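-- pv_equiv track=rewrite | github.com/ScottSloan/Bili23-Downloader | src/utils/tools.py | convert_to_bvid
-- ===== SOURCE A (Python) =====
-- def convert_to_bvid(aid: int):
--     # 将 avid 转换为 BVid
--     table = "fZodR9XQDSUm21yCkr6zBqiveYah8bt4xsWpHnJE7jL5VG3guMTKNPAwcF"
--     map = {}
--
--     s = [11, 10, 3, 8, 4, 6]
--     xor = 177451812
--     add = 8728348608
--
--     for i in range(58):
--         map[table[i]] = i
--
--     aid = (aid ^ xor) + add
--     r = list("BV1  4 1 7  ")
--
--     for i in range(6):
--         r[s[i]] = table[aid // 58 ** i % 58]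
--
--     return "".join(r)
-- ===== SOURCE B (Python) =====
-- def convert_to_bvid(aid: int):
--     # Recursive MSB-first base-58 digit extraction; the result string is built by
--     # direct concatenation of the digits into the fixed layout (no template list,
--     # no position list, no in-place mutation).
--     table = "fZodR9XQDSUm21yCkr6zBqiveYah8bt4xsWpHnJE7jL5VG3guMTKNPAwcF"
--
--     def digits(x, n):
--         # the n low base-58 digits of x, most significant first
--         if n == 0:
--             return ""
--         return digits(x // 58, n - 1) + table[x % 58]
--
--     d = digits((aid ^ 177451812) + 8728348608, 6)
--     return "BV1" + d[3] + d[1] + "4" + d[0] + "1" + d[2] + "7" + d[4] + d[5]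
-- ===== Notes on version B (the rewrite author's own statement) =====
-- stated objective: alternative
-- what changed: Replaces the template-list mutation with per-digit powers (and the dead char->index dict) by a recursive most-significant-first base-58 digit extraction whose digits are concatenated directly into the fixed 'BV1..4.1.7..' layout; no list, no position array, no powers.
import Mathlib
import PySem

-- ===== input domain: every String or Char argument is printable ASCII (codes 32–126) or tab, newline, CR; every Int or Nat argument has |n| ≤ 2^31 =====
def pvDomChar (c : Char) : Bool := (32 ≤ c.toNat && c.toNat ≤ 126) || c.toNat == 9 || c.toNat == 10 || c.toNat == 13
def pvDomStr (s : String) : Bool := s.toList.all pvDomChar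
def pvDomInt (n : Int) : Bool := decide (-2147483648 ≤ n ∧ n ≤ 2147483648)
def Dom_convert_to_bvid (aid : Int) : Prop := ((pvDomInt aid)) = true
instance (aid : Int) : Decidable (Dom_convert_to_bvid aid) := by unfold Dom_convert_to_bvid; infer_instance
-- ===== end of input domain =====

-- B replaces A's template mutation with recursive MSB-first digit extraction and direct concatenation; objective: alternative.

-- ===== PORT A =====
def convert_to_bvid (aid : Int) : String :=
  let table := "fZodR9XQDSUm21yCkr6zBqiveYah8bt4xsWpHnJE7jL5VG3guMTKNPAwcF"
  -- the dead `map` dict of A, built and never used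
  let _map : PySem.Dict Char Int :=
    (List.range 58).foldl (fun m i =>
      m.insert ((PySem.Str.pyGet? table (i : Int)).getD ' ') (i : Int)) PySem.Dict.empty
  let s : List Nat := [11, 10, 3, 8, 4, 6]
  let aid2 := PySem.Int.bxor aid 177451812 + 8728348608
  let r := "BV1  4 1 7  ".toList
  let r := (List.range 6).foldl (fun r i =>
    -- r[s[i]] = table[aid // 58 ** i % 58]; the index is in [0,58) so getD never hits its default
    r.set (s.getD i 0)
      ((PySem.Str.pyGet? table (PySem.Int.mod (PySem.Int.floordiv aid2 (58 ^ i)) 58)).getD ' ')) r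
  String.mk r

-- ===== PORT B =====
-- the n low base-58 digits of x, most significant first (Source B's inner `digits`)
def pvDigitsB (table : String) (x : Int) : Nat → List Char
  | 0 => []
  | n + 1 => pvDigitsB table (PySem.Int.floordiv x 58) n
      ++ [(PySem.Str.pyGet? table (PySem.Int.mod x 58)).getD ' ']

def convert_to_bvid_alt (aid : Int) : String :=
  let table := "fZodR9XQDSUm21yCkr6zBqiveYah8bt4xsWpHnJE7jL5VG3guMTKNPAwcF"
  let d := pvDigitsB table (PySem.Int.bxor aid 177451812 + 8728348608) 6
  -- "BV1" + d[3] + d[1] + "4" + d[0] + "1" + d[2] + "7" + d[4] + d[5]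
  String.mk (['B', 'V', '1'] ++ [d.getD 3 ' ', d.getD 1 ' '] ++ ['4'] ++ [d.getD 0 ' ']
    ++ ['1'] ++ [d.getD 2 ' '] ++ ['7'] ++ [d.getD 4 ' ', d.getD 5 ' '])

-- ===== PRECONDITION & SPEC =====
def Spec_convert_to_bvid (aid : Int) (out : String) : Prop := out = convert_to_bvid_alt aid
instance (aid : Int) (out : String) : Decidable (Spec_convert_to_bvid aid out) := by unfold Spec_convert_to_bvid; infer_instance

-- ===== CLAIM =====
def Claim_equal_convert_to_bvid : Prop := ∀ (aid : Int), Dom_convert_to_bvid aid → Spec_convert_to_bvid aid (convert_to_bvid aid)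

-- ===== LEMMAS AND PROOFS =====

theorem pv_fd_step (x : Int) (k : Nat) :
    PySem.Int.floordiv (PySem.Int.floordiv x (58 ^ k)) 58 = PySem.Int.floordiv x (58 ^ (k + 1)) := by
  rw [PySem.Int.floordiv_eq_ediv_of_pos (by positivity),
    PySem.Int.floordiv_eq_ediv_of_pos (by norm_num),
    PySem.Int.floordiv_eq_ediv_of_pos (by positivity),
    Int.ediv_ediv_of_nonneg (by positivity), pow_succ]

theorem pv_fd_c1 (x : Int) : PySem.Int.floordiv (PySem.Int.floordiv x 58) 58 = PySem.Int.floordiv x (58 ^ 2) := by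
  have := pv_fd_step x 1; rw [pow_one] at this; exact this
theorem pv_fd_c2 (x : Int) : PySem.Int.floordiv (PySem.Int.floordiv x (58 ^ 2)) 58 = PySem.Int.floordiv x (58 ^ 3) := pv_fd_step x 2
theorem pv_fd_c3 (x : Int) : PySem.Int.floordiv (PySem.Int.floordiv x (58 ^ 3)) 58 = PySem.Int.floordiv x (58 ^ 4) := pv_fd_step x 3
theorem pv_fd_c4 (x : Int) : PySem.Int.floordiv (PySem.Int.floordiv x (58 ^ 4)) 58 = PySem.Int.floordiv x (58 ^ 5) := pv_fd_step x 4

-- ===== VERDICT =====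
theorem convert_to_bvid_spec : Claim_equal_convert_to_bvid := by
  intro aid _
  unfold Spec_convert_to_bvid convert_to_bvid convert_to_bvid_alt
  simp only [List.range_succ, List.range_zero, List.nil_append, List.cons_append,
    List.foldl_cons, List.foldl_nil, List.getD, List.getElem?_cons_zero,
    List.getElem?_cons_succ, Option.getD_some, pvDigitsB, pow_one, pow_zero,
    pv_fd_c1, pv_fd_c2, pv_fd_c3, pv_fd_c4]
  simp [PySem.Int.floordiv]
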